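-- pv_equiv track=rewrite | github.com/tr1ten/DNA | companies/Adobe/RectGame.py | solve
-- ===== SOURCE A (Python) =====
-- import bisect
-- from collections import defaultdict
--
-- class BIT:
--     def __init__(self,n:int):
--        self.nums = [0]*(n+1)
--     def update(self,i:int,val:int):
--         i +=1
--         while(i<len(self.nums)):
--             self.nums[i] +=val
--             i += (i&(-i))
--     def sum(self,i:int) -> int:
--         r = 0
--         i +=1
--         while(i>0):
--             r += self.nums[i]
--             i -= (i&(-i))
--         return r
--
-- def solve(h:list[int],w:list[int],k:int):
--     inds = sorted(range(len(h)),key=lambda x:w[x]) # sort based on x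
--     N = len(h)
--     def ok(sz): # check if there exist a rectangle with side 2sz contain k points
--         # map y indices to (0,m) for bit
--         # find all y points we might need
--         to_id = defaultdict(int)
--         for y in h:
--             to_id[y] +=1 # point y
--             to_id[y+sz] +=1  # point y+sz
--             to_id[y-sz-1] +=1 # point y-sz-1
--         id = 0 # map them to unique id
--         for y in sorted(to_id.keys()):
--             to_id[y] = id
--             id +=1
--         end,start,i = 0,0,0
--         bit = BIT(id)
--         while(i<N): # sliding window, assuming each point i as middle point in square of side 2*sz
--             while(start<i and w[inds[start]]<w[inds[i]]-sz):
--                 bit.update(to_id[h[inds[start]]],-1) # remove old y's from bit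
--                 start +=1
--             while(end<N and w[inds[end]]<=w[inds[i]]+sz):
--                 bit.update(to_id[h[inds[end] ] ],+1) # add new y's
--                 end +=1
--             if bit.sum(to_id[h[inds[i]]+sz] )-bit.sum(to_id[h[inds[i]]-sz-1] ) >=k:
--                 return True # check total number of points from y-sz to y+sz
--             i+=1
--         return False
--     MAX = max(max(h),max(w))
--     return bisect.bisect_left(range(0,MAX),True,key=ok) # binary search all possible value of side
-- ===== SOURCE B (Python) =====
-- import bisect
--
-- def solve(h, w, k):
--     N = len(h)
--     def ok(sz):  # does some axis-aligned square of half-side sz centered on a point hold >= k points?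
--         for i in range(N):
--             cnt = 0
--             for j in range(N):
--                 if abs(w[j] - w[i]) <= sz and abs(h[j] - h[i]) <= sz:
--                     cnt += 1
--             if cnt >= k:
--                 return True
--         return False
--     MAX = max(max(h), max(w))
--     return bisect.bisect_left(range(0, MAX), True, key=ok)
-- ===== Notes on version B (the rewrite author's own statement) =====
-- stated objective: simpler
-- what changed: The feasibility check ok(sz) inside the binary search is re-implemented as a direct double scan (for each candidate center count the points inside its box), discarding A's Fenwick tree, coordinate-compression dict and sorted sliding window.
import Mathlib
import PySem

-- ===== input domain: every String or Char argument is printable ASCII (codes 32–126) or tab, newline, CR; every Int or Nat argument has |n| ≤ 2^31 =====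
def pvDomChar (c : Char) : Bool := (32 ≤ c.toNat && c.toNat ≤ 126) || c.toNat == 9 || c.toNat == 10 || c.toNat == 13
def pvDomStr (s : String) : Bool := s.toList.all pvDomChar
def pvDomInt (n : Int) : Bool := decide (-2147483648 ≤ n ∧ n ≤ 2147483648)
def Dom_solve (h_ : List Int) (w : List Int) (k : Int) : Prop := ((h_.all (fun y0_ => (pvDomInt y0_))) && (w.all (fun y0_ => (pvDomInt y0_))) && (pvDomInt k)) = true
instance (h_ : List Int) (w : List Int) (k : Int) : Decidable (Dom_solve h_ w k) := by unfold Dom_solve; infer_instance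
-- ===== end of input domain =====

-- B replaces A's BIT + coordinate-compression + sorted sliding-window feasibility check by a
-- plain nested-loop point count inside the same binary search; objective: simpler.


-- ===== PORT A =====
-- Port of A (BIT + coordinate compression + sorted sliding window inside a binary search).
-- Loop counters are the same nonnegative integers Python holds; `fuel` arguments only bound
-- the iteration count of the two BIT while-loops (proved sufficient on every reachable call).

-- BIT.update: `i += 1; while i < len(nums): nums[i] += val; i += i & -i`
def pvBitUpdateGo (fuel : Nat) (nums : List Int) (i : Int) (val : Int) : List Int :=
  match fuel with
  | 0 => nums
  | fuel + 1 =>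
    if i < (nums.length : Int) then
      pvBitUpdateGo fuel (PySem.List.pySetD nums i (PySem.List.pyGetD nums i 0 + val))
        (i + PySem.Int.band i (-i)) val
    else nums

def pvBitUpdate (nums : List Int) (i : Int) (val : Int) : List Int :=
  pvBitUpdateGo nums.length nums (i + 1) val

-- BIT.sum: `r = 0; i += 1; while i > 0: r += nums[i]; i -= i & -i`
def pvBitSumGo (fuel : Nat) (nums : List Int) (i : Int) (r : Int) : Int :=
  match fuel with
  | 0 => r
  | fuel + 1 =>
    if 0 < i then
      pvBitSumGo fuel nums (i - PySem.Int.band i (-i)) (r + PySem.List.pyGetD nums i 0)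
    else r

def pvBitSum (nums : List Int) (i : Int) : Int :=
  pvBitSumGo (i + 1).toNat nums (i + 1) 0

-- `to_id = defaultdict(int); for y in h: to_id[y]+=1; to_id[y+sz]+=1; to_id[y-sz-1]+=1`
def pvBuildKeys (h_ : List Int) (sz : Int) : PySem.Dict Int Int :=
  h_.foldl
    (fun d y => ((d.modify y 0 (· + 1)).modify (y + sz) 0 (· + 1)).modify (y - sz - 1) 0 (· + 1))
    PySem.Dict.empty

-- `id = 0; for y in sorted(to_id.keys()): to_id[y] = id; id += 1`
def pvAssignIds (d : PySem.Dict Int Int) : PySem.Dict Int Int × Int :=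
  (PySem.List.sorted d.keys (fun y => y)).foldl (fun p y => (p.1.insert y p.2, p.2 + 1)) (d, 0)

-- `while start < i and w[inds[start]] < w[inds[i]] - sz: bit.update(to_id[h[inds[start]]], -1); start += 1`
def pvStartLoop (h_ w inds : List Int) (toId : PySem.Dict Int Int) (sz : Int) (i : Nat)
    (start : Nat) (nums : List Int) : Nat × List Int :=
  if start < i ∧
      PySem.List.pyGetD w (PySem.List.pyGetD inds (start : Int) 0) 0 <
        PySem.List.pyGetD w (PySem.List.pyGetD inds (i : Int) 0) 0 - sz then
    pvStartLoop h_ w inds toId sz i (start + 1)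
      (pvBitUpdate nums (toId.getD (PySem.List.pyGetD h_ (PySem.List.pyGetD inds (start : Int) 0) 0) 0) (-1))
  else (start, nums)
termination_by i - start
decreasing_by omega

-- `while end < N and w[inds[end]] <= w[inds[i]] + sz: bit.update(to_id[h[inds[end]]], +1); end += 1`
def pvEndLoop (h_ w inds : List Int) (toId : PySem.Dict Int Int) (sz : Int) (N i : Nat)
    (e : Nat) (nums : List Int) : Nat × List Int :=
  if e < N ∧
      PySem.List.pyGetD w (PySem.List.pyGetD inds (e : Int) 0) 0 ≤
        PySem.List.pyGetD w (PySem.List.pyGetD inds (i : Int) 0) 0 + sz then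
    pvEndLoop h_ w inds toId sz N i (e + 1)
      (pvBitUpdate nums (toId.getD (PySem.List.pyGetD h_ (PySem.List.pyGetD inds (e : Int) 0) 0) 0) 1)
  else (e, nums)
termination_by N - e
decreasing_by omega

-- `while i < N: <start loop>; <end loop>; if bit.sum(..) - bit.sum(..) >= k: return True; i += 1`
def pvOkLoop (h_ w inds : List Int) (toId : PySem.Dict Int Int) (k sz : Int) (N : Nat)
    (i start e : Nat) (nums : List Int) : Bool :=
  if hiN : i < N then
    let p1 := pvStartLoop h_ w inds toId sz i start nums
    let p2 := pvEndLoop h_ w inds toId sz N i e p1.2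
    if pvBitSum p2.2 (toId.getD (PySem.List.pyGetD h_ (PySem.List.pyGetD inds (i : Int) 0) 0 + sz) 0) -
        pvBitSum p2.2 (toId.getD (PySem.List.pyGetD h_ (PySem.List.pyGetD inds (i : Int) 0) 0 - sz - 1) 0) ≥ k then
      true
    else pvOkLoop h_ w inds toId k sz N (i + 1) p1.1 p2.1 p2.2
  else false
termination_by N - i
decreasing_by omega

def pvOkA (h_ w inds : List Int) (k : Int) (N : Nat) (sz : Int) : Bool :=
  let pr := pvAssignIds (pvBuildKeys h_ sz)
  pvOkLoop h_ w inds pr.1 k sz N 0 0 0 (List.replicate (pr.2.toNat + 1) 0)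

-- hand port of bisect.bisect_left(range(0, MAX), True, key=ok) (both Pythons call it):
-- CPython: `while lo < hi: mid = (lo+hi)//2; if key(a[mid]) < True: lo = mid+1 else: hi = mid; return lo`
-- exact: a[mid] = mid for the list range(0, MAX), and `b < True` on bools is `b = False`.
def pvBisect (ok : Int → Bool) (lo hi : Nat) : Nat :=
  if lo < hi then
    let mid := (lo + hi) / 2
    if ok (mid : Int) then pvBisect ok lo mid else pvBisect ok (mid + 1) hi
  else lo
termination_by hi - lo
decreasing_by all_goals omega

def solve (h_ : List Int) (w : List Int) (k : Int) : Int :=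
  let inds := PySem.List.sorted (PySem.List.pyRange 0 (h_.length : Int) 1)
      (fun x => PySem.List.pyGetD w x 0)
  let N := h_.length
  let MAX := max ((PySem.List.max? h_ (fun y => y)).getD 0) ((PySem.List.max? w (fun y => y)).getD 0)
  ((pvBisect (pvOkA h_ w inds k N) 0 MAX.toNat : Nat) : Int)

-- ===== PORT B =====
-- Port of B: the same outer bisect, with ok(sz) a plain double scan.

-- `cnt = 0; for j in range(N): if abs(w[j]-w[i]) <= sz and abs(h[j]-h[i]) <= sz: cnt += 1`
def pvCntB (h_ w : List Int) (N : Nat) (sz : Int) (i : Nat) : Int :=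
  (List.range N).foldl
    (fun cnt j =>
      if |w.getD j 0 - w.getD i 0| ≤ sz ∧ |h_.getD j 0 - h_.getD i 0| ≤ sz then cnt + 1 else cnt)
    0

-- `for i in range(N): ...; if cnt >= k: return True
--  return False`
def pvOkBLoop (h_ w : List Int) (k : Int) (N : Nat) (sz : Int) (i : Nat) : Bool :=
  if i < N then
    if pvCntB h_ w N sz i ≥ k then true else pvOkBLoop h_ w k N sz (i + 1)
  else false
termination_by N - i
decreasing_by omega

def pvOkB (h_ w : List Int) (k : Int) (N : Nat) (sz : Int) : Bool :=
  pvOkBLoop h_ w k N sz 0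

def solve_alt (h_ : List Int) (w : List Int) (k : Int) : Int :=
  let N := h_.length
  let MAX := max ((PySem.List.max? h_ (fun y => y)).getD 0) ((PySem.List.max? w (fun y => y)).getD 0)
  ((pvBisect (pvOkB h_ w k N) 0 MAX.toNat : Nat) : Int)

-- ===== PRECONDITION & SPEC =====
-- Pre_ excludes exactly the inputs where A raises: empty h (max(h) is a ValueError) and
-- len(w) < len(h) (the sort key w[x] is an IndexError).
def Pre_solve (h_ : List Int) (w : List Int) (k : Int) : Prop :=
  h_ ≠ [] ∧ h_.length ≤ w.length
instance (h_ : List Int) (w : List Int) (k : Int) : Decidable (Pre_solve h_ w k) := by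
  unfold Pre_solve; infer_instance

def pvWitness_solve : List Int × List Int × Int := ([1, 2], [1, 2], 2)

def Spec_solve (h_ : List Int) (w : List Int) (k : Int) (out : Int) : Prop := out = solve_alt h_ w k
instance (h_ : List Int) (w : List Int) (k : Int) (out : Int) : Decidable (Spec_solve h_ w k out) := by unfold Spec_solve; infer_instance

-- ===== CLAIM (what is proved, stated in full; the proofs are below) =====
def Claim_equal_solve : Prop := ∀ (h_ : List Int) (w : List Int) (k : Int), Dom_solve h_ w k → Pre_solve h_ w k → Spec_solve h_ w k (solve h_ w k)

-- ===== LEMMAS AND PROOFS =====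

def lowb (n : Nat) : Nat := n - (n &&& (n - 1))

lemma land_self_pred_odd (m : Nat) : (2 * m + 1) &&& (2 * m) = 2 * m := by
  apply Nat.eq_of_testBit_eq
  intro i
  cases i with
  | zero => simp [Nat.testBit_zero, Nat.add_mul_mod_self_left, Nat.mul_mod_right]
  | succ i =>
      rw [Nat.testBit_and]
      simp only [Nat.testBit_add_one]
      rw [show (2 * m + 1) / 2 = m by omega, show 2 * m / 2 = m by omega, Bool.and_self]

lemma land_self_pred_even (m : Nat) (hm : 0 < m) : (2 * m) &&& (2 * m - 1) = 2 * (m &&& (m - 1)) := by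
  obtain ⟨m', rfl⟩ : ∃ m', m = m' + 1 := ⟨m - 1, by omega⟩
  have h1 : 2 * (m' + 1) - 1 = 2 * m' + 1 := by omega
  have h2 : m' + 1 - 1 = m' := by omega
  rw [h1, h2]
  apply Nat.eq_of_testBit_eq
  intro i
  cases i with
  | zero =>
      rw [Nat.testBit_and]
      simp [Nat.testBit_zero, Nat.mul_mod_right]
  | succ i =>
      rw [Nat.testBit_and]
      simp only [Nat.testBit_add_one]
      rw [show 2 * (m' + 1) / 2 = m' + 1 by omega, show (2 * m' + 1) / 2 = m' by omega,
        show 2 * ((m' + 1) &&& m') / 2 = (m' + 1) &&& m' by omega, Nat.testBit_and]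

lemma lowb_odd (m : Nat) : lowb (2 * m + 1) = 1 := by
  unfold lowb
  rw [show 2 * m + 1 - 1 = 2 * m by omega, land_self_pred_odd]
  omega

lemma lowb_even (m : Nat) (hm : 0 < m) : lowb (2 * m) = 2 * lowb m := by
  unfold lowb
  rw [land_self_pred_even m hm, Nat.mul_sub]

lemma lowb_spec (n : Nat) (hn : 0 < n) : ∃ K M, n = 2 ^ K * (2 * M + 1) ∧ lowb n = 2 ^ K := by
  induction n using Nat.strong_induction_on with
  | _ n ih =>
    rcases Nat.even_or_odd n with ⟨m, hm⟩ | ⟨m, hm⟩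
    · have hm' : 0 < m := by omega
      obtain ⟨K, M, h1, h2⟩ := ih m (by omega) hm'
      exact ⟨K + 1, M, by rw [hm]; ring_nf; rw [h1]; ring, by
        rw [hm, show m + m = 2 * m by ring, lowb_even m hm', h2]; ring⟩
    · exact ⟨0, m, by omega, by rw [hm, lowb_odd]; rfl⟩

lemma lowb_spec_not_dvd (n : Nat) (K M : Nat) (hKM : n = 2 ^ K * (2 * M + 1)) :
    ¬ 2 ^ (K + 1) ∣ n := by
  rw [hKM, pow_succ]
  intro hd
  have := (mul_dvd_mul_iff_left (a := (2:Nat) ^ K) (by positivity)).1 hd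
  omega

lemma lowb_uniq (n : Nat) (hn : 0 < n) (j : Nat) (h1 : 2 ^ j ∣ n) (h2 : ¬ 2 ^ (j + 1) ∣ n) :
    lowb n = 2 ^ j := by
  obtain ⟨K, M, hKM, hL⟩ := lowb_spec n hn
  have hnd := lowb_spec_not_dvd n K M hKM
  have hKdvd : 2 ^ K ∣ n := ⟨2 * M + 1, hKM⟩
  have hKj : K = j := by
    by_contra hne
    rcases Nat.lt_or_ge K j with h | h
    · exact hnd (dvd_trans (pow_dvd_pow 2 (by omega)) h1)
    · exact h2 (dvd_trans (pow_dvd_pow 2 (by omega)) hKdvd)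
  rw [hL, hKj]

lemma lowb_pos (n : Nat) (hn : 0 < n) : 0 < lowb n := by
  obtain ⟨K, M, _, hL⟩ := lowb_spec n hn
  rw [hL]; positivity

lemma lowb_dvd (n : Nat) (hn : 0 < n) : lowb n ∣ n := by
  obtain ⟨K, M, hKM, hL⟩ := lowb_spec n hn
  exact hL ▸ ⟨2 * M + 1, hKM⟩

lemma lowb_le (n : Nat) (hn : 0 < n) : lowb n ≤ n :=
  Nat.le_of_dvd hn (lowb_dvd n hn)

lemma pow_dvd_le_lowb (n : Nat) (hn : 0 < n) (j : Nat) (h1 : 2 ^ j ∣ n) : 2 ^ j ≤ lowb n := by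
  obtain ⟨K, M, hKM, hL⟩ := lowb_spec n hn
  have hnd := lowb_spec_not_dvd n K M hKM
  have : j ≤ K := by
    by_contra hlt
    exact hnd (dvd_trans (pow_dvd_pow 2 (by omega)) h1)
  rw [hL]; exact Nat.pow_le_pow_right (by omega) this

-- lowb (n + lowb n) is at least 2 * lowb n
lemma le_lowb_add (n : Nat) (hn : 0 < n) : 2 * lowb n ≤ lowb (n + lowb n) := by
  obtain ⟨K, M, hKM, hL⟩ := lowb_spec n hn
  have h1 : 2 ^ (K + 1) ∣ n + lowb n := by
    rw [hL, hKM, pow_succ]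
    exact ⟨M + 1, by ring⟩
  have := pow_dvd_le_lowb (n + lowb n) (by omega) (K + 1) h1
  calc 2 * lowb n = 2 ^ (K + 1) := by rw [hL, pow_succ]; ring
  _ ≤ _ := this

-- adding d < lowb q to q (with lowb q ∣ q in the strong 2-power sense) keeps lowbit of d
lemma lowb_add_small (q d : Nat) (hq : 0 < q) (hd : 0 < d) (hlt : d < lowb q) :
    lowb (q + d) = lowb d := by
  obtain ⟨K, M, hKM, hL⟩ := lowb_spec q hq
  obtain ⟨J, P, hJP, hLd⟩ := lowb_spec d hd
  have hJK : J + 1 ≤ K := by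
    have h1 : 2 ^ J ≤ d := by
      calc 2 ^ J ≤ 2 ^ J * (2 * P + 1) := Nat.le_mul_of_pos_right _ (by omega)
      _ = d := hJP.symm
    have : 2 ^ J < 2 ^ K := by omega
    have := (Nat.pow_lt_pow_iff_right (by omega : 1 < 2)).1 this
    omega
  have hqJ : 2 ^ (J + 1) ∣ q := dvd_trans (pow_dvd_pow 2 hJK) ⟨2 * M + 1, hKM⟩
  rw [hLd]
  apply lowb_uniq (q + d) (by omega) J
  · exact Dvd.dvd.add (dvd_trans (pow_dvd_pow 2 (by omega)) hqJ) (hLd ▸ lowb_dvd d hd)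
  · intro hdd
    have h3 : 2 ^ (J + 1) ∣ d := by
      have := Nat.dvd_sub hdd hqJ
      simpa using this
    exact lowb_spec_not_dvd d J P hJP h3

-- `i & -i` of Python, on a positive int, is the lowbit
lemma band_neg_self (c : Nat) (hc : 0 < c) : PySem.Int.band (c : Int) (-(c : Int)) = ((lowb c : Nat) : Int) := by
  have h1 : (0 : Int) ≤ (c : Int) := by positivity
  have h2 : ¬ (0 : Int) ≤ -(c : Int) := by omega
  simp only [PySem.Int.band, h1, h2, if_true, if_false]
  rw [show -(-(c : Int)) - 1 = (c : Int) - 1 by ring]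
  rw [show ((c : Int)).toNat = c by omega, show ((c : Int) - 1).toNat = c - 1 by omega]
  rfl

-- membership in the Fenwick update chain of j: j ∈ (p - lowb p, p]
abbrev onCh (j p : Nat) : Prop := j ≤ p ∧ p - lowb p < j

lemma onCh_self (j : Nat) (hj : 0 < j) : onCh j j :=
  ⟨le_refl j, by have := lowb_pos j hj; omega⟩

lemma onCh_step (j p : Nat) (hj : 0 < j) (h : onCh j p) : onCh j (p + lowb p) := by
  obtain ⟨h1, h2⟩ := h
  have hp : 0 < p := by omega
  have h3 := le_lowb_add p hp
  have h4 := lowb_le p hp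
  exact ⟨by omega, by omega⟩

lemma onCh_noskip (j p p' : Nat) (hj : 0 < j) (h : onCh j p) (hd : p < p') (h2 : p' < p + lowb p) :
    ¬ onCh j p' := by
  obtain ⟨ha, hb⟩ := h
  have hp : 0 < p := by omega
  obtain ⟨d, rfl⟩ : ∃ d, p' = p + d := ⟨p' - p, by omega⟩
  have hd0 : 0 < d := by omega
  have hdl : d < lowb p := by omega
  have hls := lowb_add_small p d hp hd0 hdl
  have := lowb_le d hd0
  have := lowb_pos d hd0
  intro hc
  obtain ⟨c1, c2⟩ := hc
  rw [hls] at c2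
  omega

-- ===== Fenwick tree correctness =====

lemma pvBitUpdateGo_length (fuel : Nat) (nums : List Int) (i v : Int) :
    (pvBitUpdateGo fuel nums i v).length = nums.length := by
  induction fuel generalizing nums i with
  | zero => rfl
  | succ fuel ih =>
      rw [pvBitUpdateGo]
      split
      · rw [ih]; simp
      · rfl

lemma pvBitUpdateGo_getD (j : Nat) (hj : 0 < j) (fuel : Nat) :
    ∀ (c : Nat) (nums : List Int) (v : Int), onCh j c → nums.length ≤ fuel + c →
      ∀ p, p < nums.length →
        (pvBitUpdateGo fuel nums (c : Int) v).getD p 0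
          = nums.getD p 0 + (if onCh j p ∧ c ≤ p then v else 0) := by
  induction fuel with
  | zero =>
      intro c nums v hc hf p hp
      have hni : ¬ (onCh j p ∧ c ≤ p) := fun ⟨_, hcp⟩ => by omega
      simp [pvBitUpdateGo, hni]
  | succ fuel ih =>
      intro c nums v hc hf p hp
      have hc0 : 0 < c := by have := hc.1; omega
      rw [pvBitUpdateGo]
      by_cases hlt : (c : Int) < (nums.length : Int)
      · rw [if_pos hlt]
        have hcl : c < nums.length := by exact_mod_cast hlt
        rw [show ((c : Int) + PySem.Int.band (c : Int) (-(c : Int))) = ((c + lowb c : Nat) : Int) by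
          rw [band_neg_self c hc0]; push_cast; ring]
        simp only [PySem.List.pySetD_natCast, PySem.List.pyGetD_natCast]
        rw [ih (c + lowb c) _ v (onCh_step j c hj hc)
          (by simp only [List.length_set]; have := lowb_pos c hc0; omega)
          p (by simpa using hp)]
        have hLc := lowb_pos c hc0
        by_cases hpc : p = c
        · subst hpc
          rw [show (nums.set p (nums.getD p 0 + v)).getD p 0 = nums.getD p 0 + v by
            simp [List.getD, List.getElem?_set, hcl]]
          have h1 : ¬ (onCh j p ∧ p + lowb p ≤ p) := fun ⟨_, h⟩ => by omega
          have h2 : onCh j p ∧ p ≤ p := ⟨hc, le_refl p⟩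
          rw [if_neg h1, if_pos h2]
          ring
        · rw [show (nums.set c (nums.getD c 0 + v)).getD p 0 = nums.getD p 0 by
            simp [List.getD, List.getElem?_set, Ne.symm hpc]]
          congr 1
          by_cases hcp : onCh j p ∧ c ≤ p
          · obtain ⟨ho, hle⟩ := hcp
            have hgt : c < p := by omega
            have : ¬ p < c + lowb c := by
              intro hlt2
              exact onCh_noskip j c p hj hc hgt hlt2 ho
            rw [if_pos ⟨ho, by omega⟩, if_pos ⟨ho, hle⟩]
          · rw [if_neg (fun ⟨ho, hle⟩ => hcp ⟨ho, by omega⟩), if_neg hcp]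
      · rw [if_neg hlt]
        have : nums.length ≤ c := by omega
        have hni : ¬ (onCh j p ∧ c ≤ p) := fun ⟨_, hcp⟩ => by omega
        rw [if_neg hni]
        ring

-- the BIT invariant: cell p holds the sum of the abstract array over (p - lowb p, p]
def BitInv (nums : List Int) (a : Nat → Int) : Prop :=
  ∀ p, 0 < p → p < nums.length → nums.getD p 0 = ∑ q ∈ Finset.Ioc (p - lowb p) p, a q

lemma pvBitUpdate_length (nums : List Int) (i v : Int) :
    (pvBitUpdate nums i v).length = nums.length := pvBitUpdateGo_length _ _ _ _

lemma BitInv_congr (nums : List Int) (a b : Nat → Int) (h : ∀ q, a q = b q)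
    (hInv : BitInv nums a) : BitInv nums b := by
  intro p h1 h2
  rw [hInv p h1 h2]
  exact Finset.sum_congr rfl (fun q _ => h q)

lemma BitInv_update (nums : List Int) (a : Nat → Int) (r : Nat) (v : Int)
    (hr : r + 1 < nums.length) (hInv : BitInv nums a) :
    BitInv (pvBitUpdate nums (r : Int) v) (fun q => if q = r + 1 then a q + v else a q) := by
  intro p hp hpl
  rw [pvBitUpdate_length] at hpl
  have heq : ((r : Int) + 1) = ((r + 1 : Nat) : Int) := by push_cast; ring
  rw [pvBitUpdate, heq, pvBitUpdateGo_getD (r + 1) (by omega) nums.length (r + 1) nums v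
    (onCh_self (r + 1) (by omega)) (by omega) p hpl]
  rw [hInv p hp hpl]
  have hsplit : ∑ q ∈ Finset.Ioc (p - lowb p) p, (fun q => if q = r + 1 then a q + v else a q) q
      = (∑ q ∈ Finset.Ioc (p - lowb p) p, a q)
        + (if r + 1 ∈ Finset.Ioc (p - lowb p) p then v else 0) := by
    have hpt : ∀ q, (if q = r + 1 then a q + v else a q) = a q + (if q = r + 1 then v else 0) := by
      intro q; split <;> simp
    rw [Finset.sum_congr rfl (fun q _ => hpt q), Finset.sum_add_distrib,
      Finset.sum_ite_eq' (Finset.Ioc (p - lowb p) p) (r + 1) (fun _ => v)]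
  rw [hsplit]
  congr 1
  by_cases h1 : onCh (r + 1) p ∧ r + 1 ≤ p
  · rw [if_pos h1, if_pos (Finset.mem_Ioc.mpr ⟨h1.1.2, h1.1.1⟩)]
  · rw [if_neg h1, if_neg (fun hm => h1 ⟨⟨(Finset.mem_Ioc.mp hm).2, (Finset.mem_Ioc.mp hm).1⟩,
      (Finset.mem_Ioc.mp hm).2⟩)]

lemma pvBitSumGo_eq (nums : List Int) (a : Nat → Int) (hInv : BitInv nums a) (fuel : Nat) :
    ∀ (c : Nat) (r : Int), c ≤ fuel → c < nums.length →
      pvBitSumGo fuel nums (c : Int) r = r + ∑ q ∈ Finset.Ioc 0 c, a q := by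
  induction fuel with
  | zero =>
      intro c r hc _
      interval_cases c
      simp [pvBitSumGo]
  | succ fuel ih =>
      intro c r hc hcl
      rcases Nat.eq_zero_or_pos c with rfl | hc0
      · simp [pvBitSumGo]
      · rw [pvBitSumGo, if_pos (by exact_mod_cast hc0)]
        have hll := lowb_le c hc0
        have hlp := lowb_pos c hc0
        rw [show ((c : Int) - PySem.Int.band (c : Int) (-(c : Int))) = ((c - lowb c : Nat) : Int) by
          rw [band_neg_self c hc0]; push_cast [hll]; ring]
        rw [PySem.List.pyGetD_natCast]
        rw [ih (c - lowb c) _ (by omega) (by omega)]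
        rw [hInv c hc0 hcl]
        rw [add_assoc]
        congr 1
        rw [add_comm]
        exact Finset.sum_Ioc_consecutive a (by omega) (by omega)

lemma pvBitSum_eq (nums : List Int) (a : Nat → Int) (hInv : BitInv nums a) (r : Nat)
    (hr : r + 1 < nums.length) :
    pvBitSum nums (r : Int) = ∑ q ∈ Finset.Ioc 0 (r + 1), a q := by
  rw [pvBitSum, show ((r : Int) + 1) = ((r + 1 : Nat) : Int) by push_cast; ring]
  rw [Int.toNat_natCast]
  rw [pvBitSumGo_eq nums a hInv (r + 1) (r + 1) 0 (le_refl _) hr]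
  ring

-- ===== coordinate compression =====

def pvGen (h_ : List Int) (sz : Int) : List Int :=
  h_.flatMap (fun y => [y, y + sz, y - sz - 1])

lemma keys_modify_add (d : PySem.Dict Int Int) (y : Int) (d0 : Int) (f : Int → Int) :
    (d.modify y d0 f).keys = PySem.Set.add d.keys y := by
  rw [PySem.Dict.keys_modify]
  rcases h : d.contains y with _ | _
  · rw [PySem.Dict.keys_insert_of_not_contains d _ h,
      PySem.Set.add_of_not_mem (fun hm => by
        rw [(PySem.Dict.contains_iff_mem_keys d y).2 hm] at h; cases h)]
  · rw [PySem.Dict.keys_insert_of_contains d _ h,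
      PySem.Set.add_of_mem ((PySem.Dict.contains_iff_mem_keys d y).1 h)]

lemma keys_build_aux (sz : Int) (l : List Int) : ∀ d : PySem.Dict Int Int,
    (l.foldl (fun d y =>
        ((d.modify y 0 (· + 1)).modify (y + sz) 0 (· + 1)).modify (y - sz - 1) 0 (· + 1)) d).keys
      = PySem.Set.update d.keys (l.flatMap (fun y => [y, y + sz, y - sz - 1])) := by
  induction l with
  | nil => intro d; rw [List.foldl_nil, List.flatMap_nil, PySem.Set.update_nil]
  | cons y l ih =>
      intro d
      rw [List.foldl_cons, ih, List.flatMap_cons, PySem.Set.update_append,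
        keys_modify_add, keys_modify_add, keys_modify_add,
        PySem.Set.update_cons, PySem.Set.update_cons, PySem.Set.update_cons, PySem.Set.update_nil]

lemma keys_build (h_ : List Int) (sz : Int) :
    (pvBuildKeys h_ sz).keys = PySem.Set.ofList (pvGen h_ sz) := by
  rw [pvBuildKeys, keys_build_aux, PySem.Dict.keys_empty, pvGen]
  exact PySem.Set.update_empty _

-- the sorted distinct key list and ranks in it
def pvSK (h_ : List Int) (sz : Int) : List Int :=
  PySem.List.sorted (pvBuildKeys h_ sz).keys (fun y => y)

def pvRank (h_ : List Int) (sz : Int) (y : Int) : Nat := (pvSK h_ sz).idxOf y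

lemma pvSK_perm (h_ : List Int) (sz : Int) :
    (pvSK h_ sz).Perm (PySem.Set.ofList (pvGen h_ sz)) := by
  rw [pvSK, keys_build]
  exact PySem.List.sorted_perm _ _ _

lemma pvSK_mem (h_ : List Int) (sz : Int) (y : Int) : y ∈ pvSK h_ sz ↔ y ∈ pvGen h_ sz := by
  rw [(pvSK_perm h_ sz).mem_iff]
  exact PySem.Set.mem_ofList _ _

lemma pvSK_nodup (h_ : List Int) (sz : Int) : (pvSK h_ sz).Nodup :=
  (pvSK_perm h_ sz).nodup_iff.2 (PySem.Set.nodup_ofList _)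

lemma pvSK_strict (h_ : List Int) (sz : Int) : (pvSK h_ sz).Pairwise (· < ·) := by
  have h1 : (pvSK h_ sz).Pairwise (· ≤ ·) := PySem.List.sorted_pairwise _ _
  have := List.Pairwise.and h1 (pvSK_nodup h_ sz)
  exact this.imp (fun h => lt_of_le_of_ne h.1 h.2)

lemma pvRank_lt (h_ : List Int) (sz : Int) (y : Int) (hy : y ∈ pvSK h_ sz) :
    pvRank h_ sz y < (pvSK h_ sz).length := List.idxOf_lt_length_of_mem hy

lemma pvSK_getElem_rank (h_ : List Int) (sz : Int) (y : Int) (hy : y ∈ pvSK h_ sz) :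
    (pvSK h_ sz)[pvRank h_ sz y]'(pvRank_lt h_ sz y hy) = y :=
  List.getElem_idxOf (pvRank_lt h_ sz y hy)

lemma pvRank_mono (h_ : List Int) (sz : Int) (y1 y2 : Int) (hy1 : y1 ∈ pvSK h_ sz)
    (hy2 : y2 ∈ pvSK h_ sz) : y1 ≤ y2 ↔ pvRank h_ sz y1 ≤ pvRank h_ sz y2 := by
  have hp := List.pairwise_iff_getElem.1 (pvSK_strict h_ sz)
  have hg1 := pvSK_getElem_rank h_ sz y1 hy1
  have hg2 := pvSK_getElem_rank h_ sz y2 hy2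
  constructor
  · intro hle
    by_contra hgt
    have := hp _ _ (pvRank_lt h_ sz y2 hy2) (pvRank_lt h_ sz y1 hy1) (by omega)
    rw [hg1, hg2] at this
    omega
  · intro hle
    rcases Nat.lt_or_ge (pvRank h_ sz y1) (pvRank h_ sz y2) with hlt | hge
    · have := hp _ _ (pvRank_lt h_ sz y1 hy1) (pvRank_lt h_ sz y2 hy2) hlt
      rw [hg1, hg2] at this
      omega
    · have heq : pvRank h_ sz y1 = pvRank h_ sz y2 := by omega
      have h12 : y1 = y2 := by
        rw [← hg1, ← hg2]
        simp only [heq]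
      exact le_of_eq h12

-- the id-assignment loop
lemma assign_getD_not_mem (l : List Int) : ∀ (d : PySem.Dict Int Int) (c y : Int), y ∉ l →
    ((l.foldl (fun p y => (p.1.insert y p.2, p.2 + 1)) (d, c)).1).getD y 0 = d.getD y 0 := by
  induction l with
  | nil => intro d c y _; rfl
  | cons z l ih =>
      intro d c y hy
      rw [List.foldl_cons, ih _ _ _ (fun h => hy (List.mem_cons_of_mem _ h)),
        PySem.Dict.getD_insert]
      rw [if_neg (fun h => hy (by rw [h]; exact List.mem_cons_self ..))]

lemma assign_getD (l : List Int) (hn : l.Nodup) : ∀ (d : PySem.Dict Int Int) (c : Int),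
    ∀ y ∈ l, ((l.foldl (fun p y => (p.1.insert y p.2, p.2 + 1)) (d, c)).1).getD y 0
      = c + (l.idxOf y : Int) := by
  induction l with
  | nil => intro d c y hy; cases hy
  | cons z l ih =>
      intro d c y hy
      rcases List.mem_cons.1 hy with rfl | hyl
      · rw [List.foldl_cons, assign_getD_not_mem l _ _ _ ((List.nodup_cons.1 hn).1),
          PySem.Dict.getD_insert, if_pos rfl, List.idxOf_cons_self]
        simp
      · have hne : z ≠ y := fun h => ((List.nodup_cons.1 hn).1) (h ▸ hyl)
        rw [List.foldl_cons, ih (List.Nodup.of_cons hn) _ _ y hyl, List.idxOf_cons_ne _ hne]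
        push_cast
        ring

lemma assign_snd (l : List Int) : ∀ (d : PySem.Dict Int Int) (c : Int),
    (l.foldl (fun p y => (p.1.insert y p.2, p.2 + 1)) (d, c)).2 = c + (l.length : Int) := by
  induction l with
  | nil => intro d c; simp
  | cons z l ih =>
      intro d c
      rw [List.foldl_cons, ih]
      simp only [List.length_cons]
      push_cast
      ring

lemma pvToId_getD (h_ : List Int) (sz : Int) (y : Int) (hy : y ∈ pvSK h_ sz) :
    (pvAssignIds (pvBuildKeys h_ sz)).1.getD y 0 = ((pvRank h_ sz y : Nat) : Int) := by
  rw [pvAssignIds,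
    show (PySem.List.sorted (pvBuildKeys h_ sz).keys fun y => y) = pvSK h_ sz from rfl,
    assign_getD (pvSK h_ sz) (pvSK_nodup h_ sz) _ 0 y hy, zero_add]
  rfl

lemma pvIdc (h_ : List Int) (sz : Int) :
    (pvAssignIds (pvBuildKeys h_ sz)).2 = (((pvSK h_ sz).length : Nat) : Int) := by
  rw [pvAssignIds,
    show (PySem.List.sorted (pvBuildKeys h_ sz).keys fun y => y) = pvSK h_ sz from rfl,
    assign_snd, zero_add]

-- ===== sorted index list =====

def pvInds (h_ w : List Int) : List Int :=
  PySem.List.sorted (PySem.List.pyRange 0 (h_.length : Int) 1) (fun x => PySem.List.pyGetD w x 0)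

def pvIV (h_ w : List Int) (j : Nat) : Int := PySem.List.pyGetD (pvInds h_ w) (j : Int) 0
def pvWv (h_ w : List Int) (j : Nat) : Int := PySem.List.pyGetD w (pvIV h_ w j) 0
def pvHv (h_ w : List Int) (j : Nat) : Int := PySem.List.pyGetD h_ (pvIV h_ w j) 0

lemma pvInds_perm (h_ w : List Int) :
    (pvInds h_ w).Perm (PySem.List.pyRange 0 (h_.length : Int) 1) :=
  PySem.List.sorted_perm _ _ _

lemma length_pvInds (h_ w : List Int) : (pvInds h_ w).length = h_.length := by
  rw [(pvInds_perm h_ w).length_eq, PySem.List.length_pyRange_one]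
  omega

lemma pvIV_eq_getElem (h_ w : List Int) (j : Nat) (hj : j < h_.length) :
    pvIV h_ w j = (pvInds h_ w)[j]'(by rw [length_pvInds]; exact hj) := by
  rw [pvIV, PySem.List.pyGetD_natCast, List.getD_eq_getElem]

lemma pvIV_bounds (h_ w : List Int) (j : Nat) (hj : j < h_.length) :
    0 ≤ pvIV h_ w j ∧ pvIV h_ w j < (h_.length : Int) := by
  rw [pvIV_eq_getElem h_ w j hj]
  have hm : (pvInds h_ w)[j]'(by rw [length_pvInds]; exact hj) ∈ pvInds h_ w :=
    List.getElem_mem _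
  rw [(pvInds_perm h_ w).mem_iff, PySem.List.mem_pyRange_one] at hm
  exact hm

lemma pvWv_mono (h_ w : List Int) (j1 j2 : Nat) (h12 : j1 ≤ j2) (hj2 : j2 < h_.length) :
    pvWv h_ w j1 ≤ pvWv h_ w j2 := by
  rcases Nat.lt_or_ge j1 j2 with hlt | hge
  · have hsp : (pvInds h_ w).Pairwise
        (fun a b => PySem.List.pyGetD w a 0 ≤ PySem.List.pyGetD w b 0) :=
      PySem.List.sorted_pairwise _ _
    have hp := List.pairwise_iff_getElem.1 hsp
    have hj1 : j1 < h_.length := by omega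
    have := hp j1 j2 (by rw [length_pvInds]; exact hj1) (by rw [length_pvInds]; exact hj2) hlt
    rw [pvWv, pvWv, pvIV_eq_getElem h_ w j1 hj1, pvIV_eq_getElem h_ w j2 hj2]
    exact this
  · have : j1 = j2 := by omega
    rw [this]

-- generated-key membership for the three queried values
lemma pvHv_mem_gen (h_ w : List Int) (sz : Int) (j : Nat) (hj : j < h_.length) :
    pvHv h_ w j ∈ pvSK h_ sz ∧ pvHv h_ w j + sz ∈ pvSK h_ sz ∧
      pvHv h_ w j - sz - 1 ∈ pvSK h_ sz := by
  obtain ⟨hb1, hb2⟩ := pvIV_bounds h_ w j hj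
  have hmem : pvHv h_ w j ∈ h_ := by
    rw [pvHv]
    exact PySem.List.pyGetD_mem h_ 0 (by simp [PySem.Raise.InRange]; omega)
  refine ⟨?_, ?_, ?_⟩ <;>
    · rw [pvSK_mem, pvGen, List.mem_flatMap]
      exact ⟨pvHv h_ w j, hmem, by simp⟩

-- ===== the sliding window =====

def pvPos (h_ w : List Int) (sz : Int) (j : Nat) : Nat := pvRank h_ sz (pvHv h_ w j) + 1

def pvAwin (h_ w : List Int) (sz : Int) (s e : Nat) : Nat → Int :=
  fun p => (((Finset.Ico s e).filter (fun j => pvPos h_ w sz j = p)).card : Int)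

lemma pvAwin_remove (h_ w : List Int) (sz : Int) (s e : Nat) (hse : s < e) (q : Nat) :
    (if q = pvPos h_ w sz s then pvAwin h_ w sz s e q + (-1) else pvAwin h_ w sz s e q)
      = pvAwin h_ w sz (s + 1) e q := by
  have hins : Finset.Ico s e = insert s (Finset.Ico (s + 1) e) :=
    (Finset.insert_Ico_add_one_left_eq_Ico hse).symm
  have hnm : s ∉ Finset.Ico (s + 1) e := by simp
  rw [pvAwin, pvAwin, hins, Finset.filter_insert]
  by_cases hq : q = pvPos h_ w sz s
  · rw [if_pos hq, if_pos hq.symm, Finset.card_insert_of_notMem (fun hm => hnm (Finset.filter_subset _ _ hm))]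
    push_cast
    ring
  · rw [if_neg hq, if_neg (fun h => hq h.symm)]

lemma pvAwin_add (h_ w : List Int) (sz : Int) (s e : Nat) (hse : s ≤ e) (q : Nat) :
    (if q = pvPos h_ w sz e then pvAwin h_ w sz s e q + 1 else pvAwin h_ w sz s e q)
      = pvAwin h_ w sz s (e + 1) q := by
  have hins : Finset.Ico s (e + 1) = insert e (Finset.Ico s e) :=
    (Nat.Ico_succ_right_eq_insert_Ico hse)
  have hnm : e ∉ Finset.Ico s e := by simp
  rw [pvAwin, pvAwin, hins, Finset.filter_insert]
  by_cases hq : q = pvPos h_ w sz e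
  · rw [if_pos hq, if_pos hq.symm, Finset.card_insert_of_notMem (fun hm => hnm (Finset.filter_subset _ _ hm))]
    push_cast
    ring
  · rw [if_neg hq, if_neg (fun h => hq h.symm)]

lemma pvWv_fold (h_ w : List Int) (j : Nat) :
    PySem.List.pyGetD w (PySem.List.pyGetD (pvInds h_ w) ((j : Nat) : Int) 0) 0 = pvWv h_ w j := rfl

lemma pvHv_fold (h_ w : List Int) (j : Nat) :
    PySem.List.pyGetD h_ (PySem.List.pyGetD (pvInds h_ w) ((j : Nat) : Int) 0) 0 = pvHv h_ w j := rfl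

lemma pvStartLoop_spec (h_ w : List Int) (sz : Int) (hsz : 0 ≤ sz) (i e : Nat)
    (hiN : i < h_.length) (hie : i ≤ e) (heN : e ≤ h_.length) :
    ∀ (d : Nat), ∀ (start : Nat) (nums : List Int), i - start = d → start ≤ i →
      (∀ j < start, pvWv h_ w j < pvWv h_ w i - sz) →
      BitInv nums (pvAwin h_ w sz start e) →
      nums.length = (pvSK h_ sz).length + 1 →
      (pvStartLoop h_ w (pvInds h_ w) (pvAssignIds (pvBuildKeys h_ sz)).1 sz i start nums).1 ≤ i ∧
      (∀ j < h_.length, (pvWv h_ w j < pvWv h_ w i - sz ↔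
        j < (pvStartLoop h_ w (pvInds h_ w) (pvAssignIds (pvBuildKeys h_ sz)).1 sz i start nums).1)) ∧
      BitInv (pvStartLoop h_ w (pvInds h_ w) (pvAssignIds (pvBuildKeys h_ sz)).1 sz i start nums).2
        (pvAwin h_ w sz (pvStartLoop h_ w (pvInds h_ w) (pvAssignIds (pvBuildKeys h_ sz)).1 sz i start nums).1 e) ∧
      (pvStartLoop h_ w (pvInds h_ w) (pvAssignIds (pvBuildKeys h_ sz)).1 sz i start nums).2.length
        = (pvSK h_ sz).length + 1 := by
  intro d
  induction d using Nat.strong_induction_on with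
  | _ d ih =>
    intro start nums hd hsi hpre hInv hlen
    rw [pvStartLoop]
    simp only [pvWv_fold, pvHv_fold]
    by_cases hg : start < i ∧ pvWv h_ w start < pvWv h_ w i - sz
    · rw [if_pos hg]
      have hsN : start < h_.length := by omega
      have hmem := (pvHv_mem_gen h_ w sz start hsN).1
      have hrlt := pvRank_lt h_ sz _ hmem
      have hr1 : pvRank h_ sz (pvHv h_ w start) + 1 < nums.length := by omega
      have hInv2 := BitInv_update nums _ (pvRank h_ sz (pvHv h_ w start)) (-1) hr1 hInv
      have hInv3 := BitInv_congr _ _ _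
        (pvAwin_remove h_ w sz start e (by omega)) hInv2
      rw [pvToId_getD h_ sz _ hmem]
      exact ih (i - (start + 1)) (by omega) (start + 1) _ rfl (by omega)
        (fun j hj => by
          rcases Nat.lt_or_ge j start with hlt | hge
          · exact hpre j hlt
          · have : j = start := by omega
            rw [this]; exact hg.2)
        hInv3 (by rw [pvBitUpdate_length]; exact hlen)
    · rw [if_neg hg]
      refine ⟨hsi, ?_, hInv, hlen⟩
      intro j hj
      constructor
      · intro hwv
        by_contra hge
        have hsj : start ≤ j := by omega
        have hns : ¬ pvWv h_ w start < pvWv h_ w i - sz := by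
          rcases Nat.lt_or_ge start i with hlt | hge2
          · exact fun hc => hg ⟨hlt, hc⟩
          · have : start = i := by omega
            rw [this]; omega
        have := pvWv_mono h_ w start j hsj hj
        omega
      · intro hjs
        exact hpre j hjs

lemma pvEndLoop_spec (h_ w : List Int) (sz : Int) (hsz : 0 ≤ sz) (i s : Nat)
    (hiN : i < h_.length) :
    ∀ (d : Nat), ∀ (e : Nat) (nums : List Int), h_.length - e = d → s ≤ e → i ≤ e → e ≤ h_.length →
      (∀ j < e, pvWv h_ w j ≤ pvWv h_ w i + sz) →
      BitInv nums (pvAwin h_ w sz s e) →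
      nums.length = (pvSK h_ sz).length + 1 →
      e ≤ (pvEndLoop h_ w (pvInds h_ w) (pvAssignIds (pvBuildKeys h_ sz)).1 sz h_.length i e nums).1 ∧
      (pvEndLoop h_ w (pvInds h_ w) (pvAssignIds (pvBuildKeys h_ sz)).1 sz h_.length i e nums).1 ≤ h_.length ∧
      (∀ j < h_.length, (pvWv h_ w j ≤ pvWv h_ w i + sz ↔
        j < (pvEndLoop h_ w (pvInds h_ w) (pvAssignIds (pvBuildKeys h_ sz)).1 sz h_.length i e nums).1)) ∧
      BitInv (pvEndLoop h_ w (pvInds h_ w) (pvAssignIds (pvBuildKeys h_ sz)).1 sz h_.length i e nums).2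
        (pvAwin h_ w sz s (pvEndLoop h_ w (pvInds h_ w) (pvAssignIds (pvBuildKeys h_ sz)).1 sz h_.length i e nums).1) ∧
      (pvEndLoop h_ w (pvInds h_ w) (pvAssignIds (pvBuildKeys h_ sz)).1 sz h_.length i e nums).2.length
        = (pvSK h_ sz).length + 1 := by
  intro d
  induction d using Nat.strong_induction_on with
  | _ d ih =>
    intro e nums hd hse hie heN hpre hInv hlen
    rw [pvEndLoop]
    simp only [pvWv_fold, pvHv_fold]
    by_cases hg : e < h_.length ∧ pvWv h_ w e ≤ pvWv h_ w i + sz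
    · rw [if_pos hg]
      have heN2 : e < h_.length := hg.1
      have hmem := (pvHv_mem_gen h_ w sz e heN2).1
      have hrlt := pvRank_lt h_ sz _ hmem
      have hr1 : pvRank h_ sz (pvHv h_ w e) + 1 < nums.length := by omega
      have hInv2 := BitInv_update nums _ (pvRank h_ sz (pvHv h_ w e)) 1 hr1 hInv
      have hInv3 := BitInv_congr _ _ _
        (pvAwin_add h_ w sz s e hse) hInv2
      rw [pvToId_getD h_ sz _ hmem]
      have hres := ih (h_.length - (e + 1)) (by omega) (e + 1) _ rfl (by omega) (by omega) (by omega)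
        (fun j hj => by
          rcases Nat.lt_or_ge j e with hlt | hge
          · exact hpre j hlt
          · have : j = e := by omega
            rw [this]; exact hg.2)
        hInv3 (by rw [pvBitUpdate_length]; exact hlen)
      exact ⟨by omega, hres.2.1, hres.2.2.1, hres.2.2.2⟩
    · rw [if_neg hg]
      refine ⟨le_refl e, heN, ?_, hInv, hlen⟩
      intro j hj
      constructor
      · intro hwv
        by_contra hge
        have hej : e ≤ j := by omega
        have hne : ¬ pvWv h_ w e ≤ pvWv h_ w i + sz := by
          intro hc
          exact hg ⟨by omega, hc⟩
        have := pvWv_mono h_ w e j hej hj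
        omega
      · intro hjs
        exact hpre j hjs

-- ===== querying the BIT = counting in the window =====

lemma pvQuery_eq (h_ w : List Int) (sz : Int) (s e : Nat) (heN : e ≤ h_.length)
    (nums : List Int) (hInv : BitInv nums (pvAwin h_ w sz s e))
    (hlen : nums.length = (pvSK h_ sz).length + 1) (y : Int) (hy : y ∈ pvSK h_ sz) :
    pvBitSum nums ((pvRank h_ sz y : Nat) : Int)
      = (((Finset.Ico s e).filter (fun j => pvHv h_ w j ≤ y)).card : Int) := by
  have hr := pvRank_lt h_ sz y hy
  rw [pvBitSum_eq nums _ hInv (pvRank h_ sz y) (by omega)]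
  have h1 : ((Finset.Ico s e).filter (fun j => pvPos h_ w sz j ≤ pvRank h_ sz y + 1)).card
      = ∑ q ∈ Finset.Ioc 0 (pvRank h_ sz y + 1),
          (((Finset.Ico s e).filter (fun j => pvPos h_ w sz j ≤ pvRank h_ sz y + 1)).filter
            (fun j => pvPos h_ w sz j = q)).card :=
    Finset.card_eq_sum_card_fiberwise (fun x hx => by
      simp only [Finset.mem_coe, Finset.mem_filter] at hx
      rw [Finset.mem_coe, Finset.mem_Ioc]
      exact ⟨by unfold pvPos; omega, hx.2⟩)
  have h2 : ∑ q ∈ Finset.Ioc 0 (pvRank h_ sz y + 1), pvAwin h_ w sz s e q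
      = (((Finset.Ico s e).filter (fun j => pvPos h_ w sz j ≤ pvRank h_ sz y + 1)).card : Int) := by
    rw [h1]
    push_cast
    apply Finset.sum_congr rfl
    intro q hq
    simp only [Finset.mem_Ioc] at hq
    rw [pvAwin, Finset.filter_filter]
    congr 2
    apply Finset.filter_congr
    intro j _
    constructor
    · intro hj; exact ⟨by omega, hj⟩
    · intro hj; exact hj.2
  rw [h2]
  congr 2
  apply Finset.filter_congr
  intro j hj
  have hjN : j < h_.length := by
    have := (Finset.mem_Ico.1 hj).2
    omega
  have hmem := (pvHv_mem_gen h_ w sz j hjN).1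
  have hmono := pvRank_mono h_ sz (pvHv h_ w j) y hmem hy
  unfold pvPos
  constructor
  · intro h
    exact hmono.2 (by omega)
  · intro h
    have := hmono.1 h
    omega

lemma pvCount_diff (h_ w : List Int) (sz : Int) (hsz : 0 ≤ sz) (s e : Nat) (hc : Int) :
    (((Finset.Ico s e).filter (fun j => pvHv h_ w j ≤ hc + sz)).card : Int)
      - (((Finset.Ico s e).filter (fun j => pvHv h_ w j ≤ hc - sz - 1)).card : Int)
      = (((Finset.Ico s e).filter (fun j =>
          hc - sz ≤ pvHv h_ w j ∧ pvHv h_ w j ≤ hc + sz)).card : Int) := by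
  have hsplit := Finset.filter_card_add_filter_neg_card_eq_card
    (s := (Finset.Ico s e).filter (fun j => pvHv h_ w j ≤ hc + sz))
    (p := fun j => pvHv h_ w j ≤ hc - sz - 1)
  rw [Finset.filter_filter, Finset.filter_filter] at hsplit
  have e1 : (Finset.Ico s e).filter (fun j => pvHv h_ w j ≤ hc + sz ∧ pvHv h_ w j ≤ hc - sz - 1)
      = (Finset.Ico s e).filter (fun j => pvHv h_ w j ≤ hc - sz - 1) :=
    Finset.filter_congr (fun j _ => by
      constructor
      · intro h; exact h.2
      · intro h; exact ⟨by omega, h⟩)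
  have e2 : (Finset.Ico s e).filter (fun j => pvHv h_ w j ≤ hc + sz ∧ ¬ pvHv h_ w j ≤ hc - sz - 1)
      = (Finset.Ico s e).filter (fun j => hc - sz ≤ pvHv h_ w j ∧ pvHv h_ w j ≤ hc + sz) :=
    Finset.filter_congr (fun j _ => by
      constructor
      · intro h; exact ⟨by omega, by omega⟩
      · intro h; exact ⟨by omega, by omega⟩)
  rw [e1, e2] at hsplit
  omega

lemma pvWindow_global (h_ w : List Int) (sz : Int) (i s e : Nat) (hiN : i < h_.length)
    (heN : e ≤ h_.length)
    (hcs : ∀ j < h_.length, (pvWv h_ w j < pvWv h_ w i - sz ↔ j < s))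
    (hce : ∀ j < h_.length, (pvWv h_ w j ≤ pvWv h_ w i + sz ↔ j < e)) :
    (Finset.Ico s e).filter (fun j =>
        pvHv h_ w i - sz ≤ pvHv h_ w j ∧ pvHv h_ w j ≤ pvHv h_ w i + sz)
      = (Finset.range h_.length).filter (fun j =>
          (pvWv h_ w i - sz ≤ pvWv h_ w j ∧ pvWv h_ w j ≤ pvWv h_ w i + sz) ∧
          (pvHv h_ w i - sz ≤ pvHv h_ w j ∧ pvHv h_ w j ≤ pvHv h_ w i + sz)) := by
  ext j
  simp only [Finset.mem_filter, Finset.mem_Ico, Finset.mem_range]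
  constructor
  · rintro ⟨⟨hs, he⟩, hh⟩
    have hjN : j < h_.length := by omega
    have hA := hcs j hjN
    have hB := hce j hjN
    refine ⟨hjN, ⟨?_, hB.2 he⟩, hh⟩
    by_contra hlt
    exact absurd (hA.1 (by omega)) (by omega)
  · rintro ⟨hjN, ⟨h1, h2⟩, hh⟩
    have hA := hcs j hjN
    have hB := hce j hjN
    refine ⟨⟨?_, hB.1 h2⟩, hh⟩
    by_contra hlt
    have := hA.2 (by omega)
    omega

-- ===== the main sliding-window loop =====

def pvCntXY (h_ w : List Int) (sz x y : Int) : Int :=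
  (((Finset.range h_.length).filter (fun j =>
    (x - sz ≤ pvWv h_ w j ∧ pvWv h_ w j ≤ x + sz) ∧
    (y - sz ≤ pvHv h_ w j ∧ pvHv h_ w j ≤ y + sz))).card : Int)

lemma pvCntXY_def (h_ w : List Int) (sz x y : Int) :
    (((Finset.range h_.length).filter (fun j =>
      (x - sz ≤ pvWv h_ w j ∧ pvWv h_ w j ≤ x + sz) ∧
      (y - sz ≤ pvHv h_ w j ∧ pvHv h_ w j ≤ y + sz))).card : Int) = pvCntXY h_ w sz x y := rfl

lemma pvOkLoop_spec (h_ w : List Int) (k sz : Int) (hsz : 0 ≤ sz) :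
    ∀ (d : Nat), ∀ (i s e : Nat) (nums : List Int), h_.length - i = d →
      s ≤ i → i ≤ e → e ≤ h_.length →
      (i < h_.length → (∀ j < s, pvWv h_ w j < pvWv h_ w i - sz) ∧
        (∀ j < e, pvWv h_ w j ≤ pvWv h_ w i + sz)) →
      BitInv nums (pvAwin h_ w sz s e) → nums.length = (pvSK h_ sz).length + 1 →
      pvOkLoop h_ w (pvInds h_ w) (pvAssignIds (pvBuildKeys h_ sz)).1 k sz h_.length i s e nums
        = decide (∃ p, p < h_.length ∧ i ≤ p ∧
            k ≤ pvCntXY h_ w sz (pvWv h_ w p) (pvHv h_ w p)) := by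
  intro d
  induction d using Nat.strong_induction_on with
  | _ d ih =>
    intro i s e nums hd hsi hie heN hpre hInv hlen
    rw [pvOkLoop]
    by_cases hiN : i < h_.length
    · rw [dif_pos hiN]
      obtain ⟨hpre1, hpre2⟩ := hpre hiN
      obtain ⟨hs_le, hchar_s, hInvS, hlenS⟩ :=
        pvStartLoop_spec h_ w sz hsz i e hiN hie heN (i - s) s nums rfl hsi hpre1 hInv hlen
      obtain ⟨he_le, heN', hchar_e, hInvE, hlenE⟩ :=
        pvEndLoop_spec h_ w sz hsz i _ hiN (h_.length - e) e _ rfl (by omega) hie heN hpre2 hInvS hlenS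
      have hmemI := pvHv_mem_gen h_ w sz i hiN
      simp only [pvHv_fold]
      simp only [pvToId_getD h_ sz _ hmemI.2.1, pvToId_getD h_ sz _ hmemI.2.2]
      simp only [pvQuery_eq h_ w sz _ _ heN' _ hInvE hlenE _ hmemI.2.1,
        pvQuery_eq h_ w sz _ _ heN' _ hInvE hlenE _ hmemI.2.2]
      simp only [pvCount_diff h_ w sz hsz _ _ (pvHv h_ w i)]
      simp only [pvWindow_global h_ w sz i _ _ hiN heN' hchar_s hchar_e, pvCntXY_def]
      by_cases hk : pvCntXY h_ w sz (pvWv h_ w i) (pvHv h_ w i) ≥ k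
      · rw [if_pos hk]
        exact (decide_eq_true ⟨i, hiN, le_refl i, hk⟩).symm
      · rw [if_neg hk]
        rw [ih (d - 1) (by omega) (i + 1) _ _ _ (by omega) (by omega)
          (by have := (hchar_e i hiN).1 (by omega); omega) heN'
          (fun hi1 => ⟨fun j hj => by
              have hjN : j < h_.length := by omega
              have h1 := (hchar_s j hjN).2 hj
              have h2 := pvWv_mono h_ w i (i + 1) (by omega) hi1
              omega,
            fun j hj => by
              have hjN : j < h_.length := by omega
              have h1 := (hchar_e j hjN).2 hj
              have h2 := pvWv_mono h_ w i (i + 1) (by omega) hi1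
              omega⟩)
          hInvE hlenE]
        rw [decide_eq_decide]
        constructor
        · rintro ⟨p, hp1, hp2, hp3⟩
          exact ⟨p, hp1, by omega, hp3⟩
        · rintro ⟨p, hp1, hp2, hp3⟩
          rcases Nat.lt_or_ge i p with hlt | hge
          · exact ⟨p, hp1, by omega, hp3⟩
          · exfalso
            have : p = i := by omega
            rw [this] at hp3
            exact hk hp3
    · rw [dif_neg hiN]
      symm
      rw [decide_eq_false_iff_not]
      rintro ⟨p, hp, hip, _⟩
      omega

-- ===== B's check =====

lemma card_filter_range (N : Nat) (P : Nat → Prop) [DecidablePred P] :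
    ((Finset.range N).filter P).card = (List.range N).countP (fun j => decide (P j)) := by
  rw [List.countP_eq_length_filter]
  rfl

lemma pvCntB_eq (h_ w : List Int) (sz : Int) (c : Nat) :
    pvCntB h_ w h_.length sz c
      = (((Finset.range h_.length).filter (fun j =>
          |w.getD j 0 - w.getD c 0| ≤ sz ∧ |h_.getD j 0 - h_.getD c 0| ≤ sz)).card : Int) := by
  rw [pvCntB, PySem.List.foldl_ite_add_one, zero_add, card_filter_range]

lemma pvOkBLoop_spec (h_ w : List Int) (k sz : Int) :
    ∀ (d i : Nat), h_.length - i = d →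
      pvOkBLoop h_ w k h_.length sz i
        = decide (∃ c, c < h_.length ∧ i ≤ c ∧ k ≤ pvCntB h_ w h_.length sz c) := by
  intro d
  induction d using Nat.strong_induction_on with
  | _ d ih =>
    intro i hd
    rw [pvOkBLoop]
    by_cases hiN : i < h_.length
    · rw [if_pos hiN]
      by_cases hk : pvCntB h_ w h_.length sz i ≥ k
      · rw [if_pos hk]
        exact (decide_eq_true ⟨i, hiN, le_refl i, hk⟩).symm
      · rw [if_neg hk, ih (d - 1) (by omega) (i + 1) (by omega), decide_eq_decide]
        constructor
        · rintro ⟨c, h1, h2, h3⟩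
          exact ⟨c, h1, by omega, h3⟩
        · rintro ⟨c, h1, h2, h3⟩
          rcases Nat.lt_or_ge i c with hlt | hge
          · exact ⟨c, h1, by omega, h3⟩
          · exfalso
            have : c = i := by omega
            rw [this] at h3
            exact hk h3
    · rw [if_neg hiN]
      symm
      rw [decide_eq_false_iff_not]
      rintro ⟨c, hc, hic, _⟩
      omega

-- ===== transfer between sorted positions and original indices =====

lemma map_range_pvIV (h_ w : List Int) :
    (List.range h_.length).map (fun j => pvIV h_ w j) = pvInds h_ w := by
  apply List.ext_getElem (by simp [length_pvInds])
  intro j h1 h2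
  simp only [List.getElem_map, List.getElem_range]
  exact pvIV_eq_getElem h_ w j (by simpa using h1)

lemma countP_transfer (h_ w : List Int) (Q : Int → Int → Bool) :
    (List.range h_.length).countP (fun j => Q (pvWv h_ w j) (pvHv h_ w j))
      = (List.range h_.length).countP (fun c => Q (w.getD c 0) (h_.getD c 0)) := by
  have h1 : (fun j => Q (pvWv h_ w j) (pvHv h_ w j))
      = (fun x => Q (PySem.List.pyGetD w x 0) (PySem.List.pyGetD h_ x 0))
          ∘ (fun j => pvIV h_ w j) := rfl
  rw [h1, ← List.countP_map, map_range_pvIV,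
    (pvInds_perm h_ w).countP_eq, PySem.List.pyRange_zero_nat, List.countP_map]
  apply List.countP_congr
  intro c _
  simp only [Function.comp_apply, PySem.List.pyGetD_natCast]

lemma exists_transfer (h_ w : List Int) (P : Int → Int → Prop) :
    (∃ p, p < h_.length ∧ P (pvWv h_ w p) (pvHv h_ w p))
      ↔ (∃ c, c < h_.length ∧ P (w.getD c 0) (h_.getD c 0)) := by
  constructor
  · rintro ⟨p, hp, hP⟩
    obtain ⟨hb1, hb2⟩ := pvIV_bounds h_ w p hp
    have hcast : pvIV h_ w p = (((pvIV h_ w p).toNat : Nat) : Int) := by omega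
    rw [pvWv, pvHv, hcast, PySem.List.pyGetD_natCast, PySem.List.pyGetD_natCast] at hP
    exact ⟨(pvIV h_ w p).toNat, by omega, hP⟩
  · rintro ⟨c, hc, hP⟩
    have hmem : ((c : Nat) : Int) ∈ pvInds h_ w := by
      rw [(pvInds_perm h_ w).mem_iff, PySem.List.mem_pyRange_one]
      constructor
      · positivity
      · exact_mod_cast hc
    obtain ⟨p, hplen, hpeq⟩ := List.mem_iff_getElem.1 hmem
    have hpN : p < h_.length := by rwa [length_pvInds] at hplen
    refine ⟨p, hpN, ?_⟩
    have hiv : pvIV h_ w p = ((c : Nat) : Int) := by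
      rw [pvIV_eq_getElem h_ w p hpN]
      exact hpeq
    rw [pvWv, pvHv, hiv, PySem.List.pyGetD_natCast, PySem.List.pyGetD_natCast]
    exact hP

-- ===== ok_A = ok_B =====

lemma pvOk_eq (h_ w : List Int) (k sz : Int) (hsz : 0 ≤ sz) :
    pvOkA h_ w (pvInds h_ w) k h_.length sz = pvOkB h_ w k h_.length sz := by
  rw [pvOkA]
  have hlen0 : (List.replicate ((pvAssignIds (pvBuildKeys h_ sz)).2.toNat + 1) (0 : Int)).length
      = (pvSK h_ sz).length + 1 := by
    rw [List.length_replicate, pvIdc, Int.toNat_natCast]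
  have hInv0 : BitInv (List.replicate ((pvAssignIds (pvBuildKeys h_ sz)).2.toNat + 1) (0 : Int))
      (pvAwin h_ w sz 0 0) := by
    intro p hp hpl
    rw [List.length_replicate] at hpl
    rw [List.getD_replicate 0 hpl]
    simp [pvAwin]
  rw [pvOkLoop_spec h_ w k sz hsz h_.length 0 0 0 _ rfl (le_refl 0) (Nat.zero_le 0)
    (Nat.zero_le _) (fun _ => ⟨fun j hj => by omega, fun j hj => by omega⟩) hInv0 hlen0]
  rw [pvOkB, pvOkBLoop_spec h_ w k sz h_.length 0 rfl, decide_eq_decide]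
  have hcnt : ∀ x y : Int, pvCntXY h_ w sz x y
      = (((Finset.range h_.length).filter (fun j =>
          |w.getD j 0 - x| ≤ sz ∧ |h_.getD j 0 - y| ≤ sz)).card : Int) := by
    intro x y
    rw [pvCntXY]
    congr 1
    rw [card_filter_range, card_filter_range,
      countP_transfer h_ w (fun a b =>
        decide ((x - sz ≤ a ∧ a ≤ x + sz) ∧ (y - sz ≤ b ∧ b ≤ y + sz)))]
    apply List.countP_congr
    intro c _
    simp only [decide_eq_true_eq]
    rw [abs_le, abs_le]
    omega
  have hBC : ∀ c : Nat, pvCntB h_ w h_.length sz c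
      = pvCntXY h_ w sz (w.getD c 0) (h_.getD c 0) := by
    intro c
    rw [pvCntB_eq, hcnt]
  constructor
  · rintro ⟨p, h1, -, h3⟩
    obtain ⟨c, hc1, hc2⟩ :=
      (exists_transfer h_ w (fun x y => k ≤ pvCntXY h_ w sz x y)).1 ⟨p, h1, h3⟩
    exact ⟨c, hc1, Nat.zero_le c, by rw [hBC]; exact hc2⟩
  · rintro ⟨c, h1, -, h3⟩
    obtain ⟨p, hp1, hp2⟩ :=
      (exists_transfer h_ w (fun x y => k ≤ pvCntXY h_ w sz x y)).2
        ⟨c, h1, by rw [← hBC]; exact h3⟩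
    exact ⟨p, hp1, Nat.zero_le p, hp2⟩

-- ===== the shared binary search, pointwise-congruent keys =====

lemma pvBisect_congr (f g : Int → Bool) (hfg : ∀ m : Nat, f (m : Int) = g (m : Int)) :
    ∀ (d lo hi : Nat), hi - lo = d → pvBisect f lo hi = pvBisect g lo hi := by
  intro d
  induction d using Nat.strong_induction_on with
  | _ d ih =>
    intro lo hi hd
    rw [pvBisect, pvBisect]
    by_cases hlh : lo < hi
    · rw [if_pos hlh, if_pos hlh]
      dsimp only
      have hmid1 : lo ≤ (lo + hi) / 2 := by omega
      have hmid2 : (lo + hi) / 2 < hi := by omega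
      rw [hfg ((lo + hi) / 2)]
      by_cases hgv : g (((lo + hi) / 2 : Nat) : Int) = true
      · rw [if_pos hgv, if_pos hgv]
        exact ih ((lo + hi) / 2 - lo) (by omega) lo ((lo + hi) / 2) rfl
      · rw [if_neg hgv, if_neg hgv]
        exact ih (hi - ((lo + hi) / 2 + 1)) (by omega) ((lo + hi) / 2 + 1) hi rfl
    · rw [if_neg hlh, if_neg hlh]

-- ===== VERDICT (by name: the statement is the Claim_ definition above) =====
theorem solve_spec : Claim_equal_solve := by
  intro h_ w k hdom hpre
  show solve h_ w k = solve_alt h_ w k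
  have hA : solve h_ w k = ((pvBisect (pvOkA h_ w (pvInds h_ w) k h_.length) 0
      (max ((PySem.List.max? h_ (fun y => y)).getD 0)
        ((PySem.List.max? w (fun y => y)).getD 0)).toNat : Nat) : Int) := rfl
  have hB : solve_alt h_ w k = ((pvBisect (pvOkB h_ w k h_.length) 0
      (max ((PySem.List.max? h_ (fun y => y)).getD 0)
        ((PySem.List.max? w (fun y => y)).getD 0)).toNat : Nat) : Int) := rfl
  rw [hA, hB]
  exact congrArg (fun n : Nat => (n : Int))
    (pvBisect_congr _ _ (fun m => pvOk_eq h_ w k m (by exact_mod_cast Nat.zero_le m)) _ 0 _ rfl)
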